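-- pv_equiv track=rewrite | github.com/priyasundaresan/cryptoquip-solver | cryptoquip.py | hashWord
-- ===== SOURCE A (Python) =====
-- import string # Used to get a list of letters A-Z
--
-- LETTERS = string.ascii_uppercase
--
-- def hashWord(word):
--     """ Generates the canonical form of a word; 'HELLO' -> 'ABCCD' """
--     seen = {}
--     i = 0
--     pattern = []
--     for ch in word:
--         if ch in seen:
--             pattern.append(seen[ch])
--         else:
--             seen[ch] = LETTERS[i]
--             pattern.append(seen[ch])
--             i += 1
--     return ''.join(pattern)
-- ===== SOURCE B (Python) =====
-- import string
--
-- LETTERS = string.ascii_uppercase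
--
-- def hashWord(word):
--     """ Generates the canonical form of a word; 'HELLO' -> 'ABCCD' """
--     uniques = []
--     for ch in word:
--         if ch not in uniques:
--             uniques.append(ch)
--     return ''.join(LETTERS[uniques.index(ch)] for ch in word)
-- ===== Notes on version B (the rewrite author's own statement) =====
-- stated objective: alternative
-- what changed: Replaces the one-pass loop that threads a growing char-to-letter dict and a counter through every iteration with a two-pass build: first collect the distinct characters in first-appearance order, then map each character to LETTERS[rank] by scanning that list.
import Mathlib
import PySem

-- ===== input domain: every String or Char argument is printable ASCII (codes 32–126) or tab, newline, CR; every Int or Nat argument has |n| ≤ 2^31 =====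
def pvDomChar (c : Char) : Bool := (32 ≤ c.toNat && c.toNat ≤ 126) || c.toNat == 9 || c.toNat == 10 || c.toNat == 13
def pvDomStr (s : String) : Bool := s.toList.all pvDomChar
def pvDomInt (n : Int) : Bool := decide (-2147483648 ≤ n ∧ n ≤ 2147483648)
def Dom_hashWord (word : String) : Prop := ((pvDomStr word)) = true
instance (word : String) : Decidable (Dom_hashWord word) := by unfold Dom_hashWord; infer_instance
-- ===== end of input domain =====

-- B replaces A's single-pass dict-and-counter loop with a two-pass build (collect distinct
-- characters in first-appearance order, then map each character by scanning that list);
-- an alternative decomposition, not claimed faster.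


-- LETTERS = string.ascii_uppercase (as its list of characters)
def pvLetters : List Char := "ABCDEFGHIJKLMNOPQRSTUVWXYZ".toList

-- ===== PORT A =====
-- the for-loop of A: state (seen, i, pattern); LETTERS[i] raises IndexError (none) past 'Z'
def hashWordLoop : List Char → PySem.Dict Char Char → Int → List Char → Option (List Char)
  | [], _, _, pat => some pat
  | ch :: rest, seen, i, pat =>
    match seen.get? ch with
    | some v => hashWordLoop rest seen i (pat ++ [v])
    | none =>
      match PySem.List.pyGet? pvLetters i with
      | none => none      -- IndexError: excluded by Pre_hashWord
      | some l => hashWordLoop rest (seen.insert ch l) (i + 1) (pat ++ [l])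

def hashWord (word : String) : String :=
  ((hashWordLoop word.toList PySem.Dict.empty 0 []).map String.ofList).getD ""

-- ===== PORT B =====
-- first pass: distinct characters in first-appearance order
def pvUniq : List Char → List Char → List Char
  | [], u => u
  | ch :: rest, u => if ch ∈ u then pvUniq rest u else pvUniq rest (u ++ [ch])

-- second pass: LETTERS[uniques.index(ch)] for each ch (none = IndexError, excluded by Pre_)
def pvMapB : List Char → List Char → Option (List Char)
  | [], _ => some []
  | ch :: rest, u =>
    match (PySem.List.index? u ch).bind (fun k => PySem.List.pyGet? pvLetters (k : Int)) with
    | none => none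
    | some l => (pvMapB rest u).map (l :: ·)

def hashWord_alt (word : String) : String :=
  ((pvMapB word.toList (pvUniq word.toList [])).map String.ofList).getD ""

-- ===== PRECONDITION & SPEC =====
-- Pre_ excludes exactly the words with more than 26 distinct characters, on which the
-- Python A (and B) raises IndexError at LETTERS[i].
def Pre_hashWord (word : String) : Prop := word.toList.dedup.length ≤ 26
instance (word : String) : Decidable (Pre_hashWord word) := by unfold Pre_hashWord; infer_instance
def pvWitness_hashWord : String := "HELLO"

def Spec_hashWord (word : String) (out : String) : Prop := out = hashWord_alt word
instance (word : String) (out : String) : Decidable (Spec_hashWord word out) := by unfold Spec_hashWord; infer_instance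

-- ===== CLAIM (what is proved, stated in full; the proofs are below) =====
def Claim_equal_hashWord : Prop := ∀ (word : String), Dom_hashWord word → Pre_hashWord word → Spec_hashWord word (hashWord word)

-- ===== LEMMAS AND PROOFS =====

-- pvUniq only appends to its accumulator
theorem pvUniq_append (cs : List Char) : ∀ (u : List Char), ∃ t, pvUniq cs u = u ++ t := by
  induction cs with
  | nil => intro u; exact ⟨[], by simp [pvUniq]⟩
  | cons ch rest ih =>
    intro u
    by_cases h : ch ∈ u
    · obtain ⟨t, ht⟩ := ih u
      exact ⟨t, by simp [pvUniq, h, ht]⟩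
    · obtain ⟨t, ht⟩ := ih (u ++ [ch])
      exact ⟨ch :: t, by simp [pvUniq, h, ht]⟩

-- characters already collected keep their rank through the rest of the first pass
theorem index?_pvUniq_of_mem (cs : List Char) (u : List Char) (c : Char) (hc : c ∈ u) :
    PySem.List.index? (pvUniq cs u) c = PySem.List.index? u c := by
  obtain ⟨t, ht⟩ := pvUniq_append cs u
  rw [ht, PySem.List.index?_append_of_mem t hc]

-- the loop invariant: with 'seen' holding exactly the letters of the ranks in u,
-- A's loop computes B's second pass against the final uniques list
theorem loop_eq (cs : List Char) : ∀ (u : List Char) (seen : PySem.Dict Char Char) (pat : List Char),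
    (∀ c, seen.get? c = (PySem.List.index? u c).bind (fun k => PySem.List.pyGet? pvLetters (k : Int))) →
    hashWordLoop cs seen (u.length : Int) pat
      = (pvMapB cs (pvUniq cs u)).map (pat ++ ·) := by
  induction cs with
  | nil => intro u seen pat _; simp [hashWordLoop, pvMapB]
  | cons ch rest ih =>
    intro u seen pat hseen
    by_cases hmem : ch ∈ u
    · -- already seen: rank unchanged, uniques unchanged
      have huniq : pvUniq (ch :: rest) u = pvUniq rest u := by simp [pvUniq, hmem]
      obtain ⟨k, hk⟩ : ∃ k, PySem.List.index? u ch = some k :=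
        Option.isSome_iff_exists.mp ((PySem.List.index?_isSome_iff u ch).mpr hmem)
      obtain ⟨hklt, -, -⟩ := PySem.List.getElem_of_index?_eq_some hk
      have hidx' : List.idxOf? ch (pvUniq rest u) = some k := by
        rw [← PySem.List.index?_eq_idxOf?, index?_pvUniq_of_mem rest u ch hmem, hk]
      have hseen_ch := hseen ch
      rw [hk] at hseen_ch
      simp only [Option.bind_some, PySem.List.pyGet?_natCast] at hseen_ch
      rw [huniq]
      cases hl : pvLetters[k]? with
      | some l =>
        have hseench : seen.get? ch = some l := by rw [hseen_ch, hl]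
        have hA : hashWordLoop (ch :: rest) seen (u.length : Int) pat
            = hashWordLoop rest seen (u.length : Int) (pat ++ [l]) := by
          simp [hashWordLoop, hseench]
        have hB : pvMapB (ch :: rest) (pvUniq rest u)
            = (pvMapB rest (pvUniq rest u)).map (l :: ·) := by
          simp [pvMapB, PySem.List.index?_eq_idxOf?, hidx', hl]
        rw [hA, hB, ih u seen (pat ++ [l]) hseen]
        cases pvMapB rest (pvUniq rest u) <;> simp
      | none =>
        -- rank k exists but LETTERS[k] is out of range ⇒ |u| > 26 ⇒ A's LETTERS[i] also raises
        have h26 : 26 ≤ k := by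
          have := List.getElem?_eq_none_iff.mp hl
          simpa [pvLetters] using this
        have hseench : seen.get? ch = none := by rw [hseen_ch, hl]
        have hLu : pvLetters[u.length]? = none := by
          apply List.getElem?_eq_none
          simp [pvLetters]; omega
        have hA : hashWordLoop (ch :: rest) seen (u.length : Int) pat = none := by
          simp [hashWordLoop, hseench, PySem.List.pyGet?_natCast, hLu]
        have hB : pvMapB (ch :: rest) (pvUniq rest u) = none := by
          simp [pvMapB, PySem.List.index?_eq_idxOf?, hidx', hl]
        rw [hA, hB]; rfl
    · -- fresh character: appended to uniques at rank |u|
      have huniq : pvUniq (ch :: rest) u = pvUniq rest (u ++ [ch]) := by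
        simp [pvUniq, hmem]
      have hseench : seen.get? ch = none := by
        rw [hseen ch, (PySem.List.index?_eq_none_iff u ch).mpr hmem]; rfl
      have hidxfull : List.idxOf? ch (pvUniq rest (u ++ [ch])) = some u.length := by
        rw [← PySem.List.index?_eq_idxOf?,
          index?_pvUniq_of_mem rest (u ++ [ch]) ch (by simp),
          PySem.List.index?_append_singleton_self u ch hmem]
      rw [huniq]
      cases hl : pvLetters[u.length]? with
      | some l =>
        have hA : hashWordLoop (ch :: rest) seen (u.length : Int) pat
            = hashWordLoop rest (seen.insert ch l) ((u.length : Int) + 1) (pat ++ [l]) := by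
          simp [hashWordLoop, hseench, PySem.List.pyGet?_natCast, hl]
        have hseen' : ∀ c, (seen.insert ch l).get? c
            = (PySem.List.index? (u ++ [ch]) c).bind
                (fun k => PySem.List.pyGet? pvLetters (k : Int)) := by
          intro c
          by_cases hc : c = ch
          · subst hc
            rw [PySem.Dict.get?_insert_self, PySem.List.index?_append_singleton_self u c hmem]
            simp [PySem.List.pyGet?_natCast, hl]
          · rw [PySem.Dict.get?_insert_of_ne seen l hc, hseen]
            by_cases hcu : c ∈ u
            · rw [PySem.List.index?_append_of_mem [ch] hcu]
            · rw [(PySem.List.index?_eq_none_iff u c).mpr hcu,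
                (PySem.List.index?_eq_none_iff (u ++ [ch]) c).mpr (by simp [hcu, hc])]
        have hB : pvMapB (ch :: rest) (pvUniq rest (u ++ [ch]))
            = (pvMapB rest (pvUniq rest (u ++ [ch]))).map (l :: ·) := by
          simp [pvMapB, PySem.List.index?_eq_idxOf?, hidxfull, hl]
        have hlen : (u.length : Int) + 1 = (((u ++ [ch]).length : Nat) : Int) := by simp
        rw [hA, hB, hlen, ih (u ++ [ch]) (seen.insert ch l) (pat ++ [l]) hseen']
        cases pvMapB rest (pvUniq rest (u ++ [ch])) <;> simp
      | none =>
        have hA : hashWordLoop (ch :: rest) seen (u.length : Int) pat = none := by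
          simp [hashWordLoop, hseench, PySem.List.pyGet?_natCast, hl]
        have hB : pvMapB (ch :: rest) (pvUniq rest (u ++ [ch])) = none := by
          simp [pvMapB, PySem.List.index?_eq_idxOf?, hidxfull, hl]
        rw [hA, hB]; rfl

theorem loop_eq_top (cs : List Char) :
    hashWordLoop cs PySem.Dict.empty 0 [] = pvMapB cs (pvUniq cs []) := by
  have h := loop_eq cs [] PySem.Dict.empty []
    (by intro c; simp [PySem.Dict.get?_empty, PySem.List.index?_eq_idxOf?])
  simp only [List.length_nil, Nat.cast_zero] at h
  rw [h]
  cases pvMapB cs (pvUniq cs []) <;> simp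

-- ===== VERDICT (by name: the statement is the Claim_ definition above) =====
theorem hashWord_spec : Claim_equal_hashWord := by
  intro word _ _
  unfold Spec_hashWord hashWord hashWord_alt
  rw [loop_eq_top]
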